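-- pv_equiv track=rewrite | github.com/tushaarrr/Competitor_project_ng | app/utils/sheets_writer.py | group_and_sort_promos
-- ===== SOURCE A (Python) =====
-- from typing import List, Dict, Optional
--
-- def group_and_sort_promos(promos: List[Dict]) -> List[Dict]:
--     """
--     Group promotions by business_name in specific order, then sort within each group.
--
--     Order:
--     1. Fountain Tire
--     2. Good News Auto
--     3. Midas
--     4. Kal Tire
--     5. Jiffy Lube
--     6. Speedy Auto Service
--     7. Trail Tire Auto Centres
--     8. Integra Tire Auto Centre
--     9. Valvoline Express Care
--     10. Mr. Lube
--
--     Within each group, sort by service_name, then offer_details.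
--     """
--     # Define business order (case-insensitive matching)
--     business_order = [
--         "Fountain Tire",
--         "Good News Auto",
--         "Midas",
--         "Kal Tire",
--         "Jiffy Lube",
--         "Speedy Auto Service",
--         "Trail Tire Auto Centres",
--         "Integra Tire Auto Centre",
--         "Valvoline Express Care",
--         "Mr. Lube"
--     ]
--
--     # Create a mapping for order lookup
--     def get_business_order(business_name: str) -> int:
--         business_lower = business_name.lower()
--         for idx, ordered_business in enumerate(business_order):
--             if ordered_business.lower() in business_lower or business_lower in ordered_business.lower():
--                 return idx
--         return 999  # Unknown businesses go to end
--
--     # Group by business_name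
--     grouped = {}
--     for promo in promos:
--         business_name = promo.get("business_name", "").strip()
--         if business_name not in grouped:
--             grouped[business_name] = []
--         grouped[business_name].append(promo)
--
--     # Sort groups by order, then sort within each group
--     sorted_promos = []
--     for business_name in sorted(grouped.keys(), key=get_business_order):
--         group_promos = grouped[business_name]
--         # Sort within group: service_name, then offer_details
--         group_promos.sort(key=lambda p: (
--             p.get("service_name", "").lower(),
--             p.get("offer_details", "").lower()
--         ))
--         sorted_promos.extend(group_promos)
--
--     return sorted_promos
-- ===== SOURCE B (Python) =====
-- from typing import List, Dict
--
-- BUSINESS_ORDER = [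
--     "Fountain Tire",
--     "Good News Auto",
--     "Midas",
--     "Kal Tire",
--     "Jiffy Lube",
--     "Speedy Auto Service",
--     "Trail Tire Auto Centres",
--     "Integra Tire Auto Centre",
--     "Valvoline Express Care",
--     "Mr. Lube",
-- ]
--
--
-- def _business_order_index(business_name: str) -> int:
--     bl = business_name.lower()
--     return next(
--         (i for i, ob in enumerate(BUSINESS_ORDER)
--          if ob.lower() in bl or bl in ob.lower()),
--         999,
--     )
--
--
-- def group_and_sort_promos(promos: List[Dict]) -> List[Dict]:
--     # First-appearance rank of each (stripped) business name.
--     first_seen = {}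
--     for promo in promos:
--         name = promo.get("business_name", "").strip()
--         first_seen.setdefault(name, len(first_seen))
--     # Two stable passes: inner key first, then the group key.
--     by_service = sorted(promos, key=lambda p: (
--         p.get("service_name", "").lower(),
--         p.get("offer_details", "").lower(),
--     ))
--     return sorted(by_service, key=lambda p: (
--         _business_order_index(p.get("business_name", "").strip()),
--         first_seen[p.get("business_name", "").strip()],
--     ))
-- ===== Notes on version B (the rewrite author's own statement) =====
-- stated objective: simpler
-- what changed: Replaces the group-into-a-dict / sort-keys / sort-each-group / concatenate pipeline by a first-appearance-rank dict plus two global stable sorted() passes (inner (service, offer) key, then (order-index, first-appearance) key).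
import Mathlib
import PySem

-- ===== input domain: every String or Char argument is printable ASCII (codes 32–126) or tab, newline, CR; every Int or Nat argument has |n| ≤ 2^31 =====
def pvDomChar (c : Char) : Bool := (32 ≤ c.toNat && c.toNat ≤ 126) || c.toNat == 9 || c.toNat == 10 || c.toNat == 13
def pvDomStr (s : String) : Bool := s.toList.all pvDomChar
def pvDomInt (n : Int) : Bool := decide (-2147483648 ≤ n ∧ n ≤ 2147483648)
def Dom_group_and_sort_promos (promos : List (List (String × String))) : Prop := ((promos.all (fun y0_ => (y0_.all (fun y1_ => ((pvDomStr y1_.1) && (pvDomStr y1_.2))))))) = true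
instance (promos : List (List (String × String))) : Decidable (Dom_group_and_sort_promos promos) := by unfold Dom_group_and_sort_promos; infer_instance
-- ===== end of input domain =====

-- B replaces A's group-by-dict / sort-keys / sort-each-group / concatenate pipeline by a
-- first-appearance-rank dict plus two global stable sorts (simpler; same results).

-- ===== PORT A =====
-- promo.get(k, dflt) on the assoc-list representation of a Python dict (first match).
def pvGet (d : List (String × String)) (k : String) (dflt : String) : String :=
  match d with
  | [] => dflt
  | (k', v) :: rest => if k' == k then v else pvGet rest k dflt

def pvBusinessOrder : List String :=
  ["Fountain Tire", "Good News Auto", "Midas", "Kal Tire", "Jiffy Lube",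
   "Speedy Auto Service", "Trail Tire Auto Centres", "Integra Tire Auto Centre",
   "Valvoline Express Care", "Mr. Lube"]

-- A's `for idx, ordered_business in enumerate(business_order): if … return idx` / `return 999` loop.
def pvOrderLoopA (bl : String) : List (Int × String) → Int
  | [] => 999
  | (idx, ob) :: rest =>
      if PySem.Str.isIn (PySem.Str.lower ob) bl || PySem.Str.isIn bl (PySem.Str.lower ob) then idx
      else pvOrderLoopA bl rest

def pvGetOrderA (businessName : String) : Int :=
  pvOrderLoopA (PySem.Str.lower businessName) (PySem.List.enumerate pvBusinessOrder 0)

def group_and_sort_promos (promos : List (List (String × String))) : List (List (String × String)) :=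
  let grouped := promos.foldl (fun d promo =>
      let businessName := PySem.Str.strip (pvGet promo "business_name" "")
      let d := if d.contains businessName then d
               else d.insert businessName ([] : List (List (String × String)))
      d.insert businessName (d.getD businessName [] ++ [promo]))
    PySem.Dict.empty
  let sortedKeys := PySem.List.sorted grouped.keys pvGetOrderA
  sortedKeys.foldl (fun acc businessName =>
      let groupPromos := grouped.getD businessName []
      acc ++ PySem.List.sorted2 groupPromos
        (fun p => PySem.Str.lower (pvGet p "service_name" ""))
        (fun p => PySem.Str.lower (pvGet p "offer_details" ""))) []

-- ===== PORT B =====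
-- B's `next((i for i, ob in enumerate(BUSINESS_ORDER) if …), 999)`.
def pvGetOrderB (businessName : String) : Int :=
  let bl := PySem.Str.lower businessName
  match (PySem.List.enumerate pvBusinessOrder 0).find?
      (fun p => PySem.Str.isIn (PySem.Str.lower p.2) bl || PySem.Str.isIn bl (PySem.Str.lower p.2)) with
  | some p => p.1
  | none => 999

def group_and_sort_promos_alt (promos : List (List (String × String))) : List (List (String × String)) :=
  let firstSeen := promos.foldl (fun d promo =>
      PySem.Dict.setdefault d (PySem.Str.strip (pvGet promo "business_name" "")) ((PySem.Dict.size d : Int)))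
    PySem.Dict.empty
  let byService := PySem.List.sorted2 promos
      (fun p => PySem.Str.lower (pvGet p "service_name" ""))
      (fun p => PySem.Str.lower (pvGet p "offer_details" ""))
  -- `first_seen[name]`: the key is always present (seeded from the same list), so getD never sees its default.
  PySem.List.sorted2 byService
    (fun p => pvGetOrderB (PySem.Str.strip (pvGet p "business_name" "")))
    (fun p => PySem.Dict.getD firstSeen (PySem.Str.strip (pvGet p "business_name" "")) 0)

-- ===== PRECONDITION & SPEC =====
def Spec_group_and_sort_promos (promos : List (List (String × String))) (out : List (List (String × String))) : Prop := out = group_and_sort_promos_alt promos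
instance (promos : List (List (String × String))) (out : List (List (String × String))) : Decidable (Spec_group_and_sort_promos promos out) := by unfold Spec_group_and_sort_promos; infer_instance

-- ===== CLAIM (what is proved, stated in full; the proofs are below) =====
def Claim_equal_group_and_sort_promos : Prop := ∀ (promos : List (List (String × String))), Dom_group_and_sort_promos promos → Spec_group_and_sort_promos promos (group_and_sort_promos promos)

-- ===== LEMMAS AND PROOFS =====

-- Abbreviations for the three fields a promo is keyed on.
def pvNm (p : List (String × String)) : String := PySem.Str.strip (pvGet p "business_name" "")
def pvSvc (p : List (String × String)) : String := PySem.Str.lower (pvGet p "service_name" "")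
def pvOff (p : List (String × String)) : String := PySem.Str.lower (pvGet p "offer_details" "")
-- The distinct (stripped) business names, in first-appearance order.
def pvK (promos : List (List (String × String))) : List String := PySem.List.dedup (promos.map pvNm)

-- The inner (service, offer, original-position) strict order on index-decorated promos.
def pvSin (d e : Int × List (String × String)) : Prop :=
  pvSvc d.2 < pvSvc e.2 ∨ (pvSvc d.2 = pvSvc e.2 ∧
    (pvOff d.2 < pvOff e.2 ∨ (pvOff d.2 = pvOff e.2 ∧ d.1 < e.1)))

-- The full strict order both pipelines realise on index-decorated promos.
def pvR (promos : List (List (String × String))) (d e : Int × List (String × String)) : Prop :=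
  pvGetOrderB (pvNm d.2) < pvGetOrderB (pvNm e.2) ∨ (pvGetOrderB (pvNm d.2) = pvGetOrderB (pvNm e.2) ∧
    ((List.idxOf (pvNm d.2) (pvK promos) : Int) < (List.idxOf (pvNm e.2) (pvK promos) : Int) ∨
     ((List.idxOf (pvNm d.2) (pvK promos) : Int) = (List.idxOf (pvNm e.2) (pvK promos) : Int) ∧ pvSin d e)))

-- ---------- generic insertion-sort lemmas ----------

lemma pv_insertBy_pairwise {α : Type} (before : α → α → Bool) (Q S : α → α → Prop)
    (hA : ∀ x y z, before x y = true → S y z → S x z)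
    (hB : ∀ x y, before x y = true → S x y)
    (hC : ∀ x y, before x y = false → Q y x → S y x)
    (x : α) : ∀ (acc : List α), acc.Pairwise S → (∀ y ∈ acc, Q y x) →
    (PySem.List.insertBy before x acc).Pairwise S
  | [], _, _ => List.pairwise_singleton ..
  | y :: ys, hp, hq => by
    rw [List.pairwise_cons] at hp
    obtain ⟨hy, hys⟩ := hp
    show List.Pairwise S (if before x y then x :: y :: ys else y :: PySem.List.insertBy before x ys)
    by_cases h : before x y = true
    · simp only [h, if_true]
      refine List.pairwise_cons.2 ⟨?_, List.pairwise_cons.2 ⟨hy, hys⟩⟩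
      intro z hz
      rcases List.mem_cons.1 hz with rfl | hz
      · exact hB x z h
      · exact hA x y z h (hy z hz)
    · rw [Bool.not_eq_true] at h
      simp only [h, Bool.false_eq_true, if_false]
      refine List.pairwise_cons.2 ⟨?_, ?_⟩
      · intro z hz
        rcases (PySem.List.mem_insertBy _ _ _ _).1 hz with rfl | hz
        · exact hC z y h (hq y List.mem_cons_self)
        · exact hy z hz
      · exact pv_insertBy_pairwise before Q S hA hB hC x ys hys
          (fun z hz => hq z (List.mem_cons_of_mem _ hz))

lemma pv_isort_pairwise {α : Type} (before : α → α → Bool) (Q S : α → α → Prop)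
    (hA : ∀ x y z, before x y = true → S y z → S x z)
    (hB : ∀ x y, before x y = true → S x y)
    (hC : ∀ x y, before x y = false → Q y x → S y x) :
    ∀ (xs acc : List α), acc.Pairwise S → (∀ y ∈ acc, ∀ x ∈ xs, Q y x) → xs.Pairwise Q →
    (xs.foldl (fun acc x => PySem.List.insertBy before x acc) acc).Pairwise S
  | [], acc, hacc, _, _ => hacc
  | x :: xs, acc, hacc, hcross, hxs => by
    rw [List.pairwise_cons] at hxs
    obtain ⟨hx, hxs⟩ := hxs
    simp only [List.foldl_cons]
    refine pv_isort_pairwise before Q S hA hB hC xs _ ?_ ?_ hxs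
    · exact pv_insertBy_pairwise before Q S hA hB hC x acc hacc
        (fun y hy => hcross y hy x List.mem_cons_self)
    · intro y hy z hz
      rcases (PySem.List.mem_insertBy _ _ _ _).1 hy with rfl | hy
      · exact hx z hz
      · exact hcross y hy z (List.mem_cons_of_mem _ hz)

lemma pv_sorted2_pairwise_stable {β κ1 κ2 : Type} [LinearOrder κ1] [LinearOrder κ2]
    (k1 : β → κ1) (k2 : β → κ2) (Q : β → β → Prop) (xs : List β) (hxs : xs.Pairwise Q) :
    (PySem.List.sorted2 xs k1 k2).Pairwise
      (fun a b => k1 a < k1 b ∨ (k1 a = k1 b ∧ (k2 a < k2 b ∨ (k2 a = k2 b ∧ Q a b)))) := by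
  show List.Pairwise _ (xs.foldl (fun acc x => PySem.List.insertBy
    (fun a b => decide (k1 a < k1 b) || !decide (k1 b < k1 a) && decide (k2 a < k2 b)) x acc) [])
  refine pv_isort_pairwise _ Q _ ?_ ?_ ?_ xs [] List.Pairwise.nil (by simp) hxs
  · intro x y z hxy hyz
    simp only [Bool.or_eq_true, Bool.and_eq_true, Bool.not_eq_eq_eq_not, Bool.not_true,
      decide_eq_true_eq, decide_eq_false_iff_not, not_lt] at hxy
    rcases hxy with h1 | ⟨h1, h2⟩
    · rcases hyz with h3 | ⟨h3, _⟩
      · exact Or.inl (lt_trans h1 h3)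
      · exact Or.inl (lt_of_lt_of_le h1 (le_of_eq h3))
    · rcases lt_or_eq_of_le h1 with h1' | h1'
      · rcases hyz with h3 | ⟨h3, _⟩
        · exact Or.inl (lt_trans h1' h3)
        · exact Or.inl (lt_of_lt_of_le h1' (le_of_eq h3))
      · rcases hyz with h3 | ⟨h3, h4⟩
        · exact Or.inl (lt_of_le_of_lt (le_of_eq h1') h3)
        · refine Or.inr ⟨h1'.trans h3, ?_⟩
          rcases h4 with h4 | ⟨h4, _⟩
          · exact Or.inl (lt_trans h2 h4)
          · exact Or.inl (lt_of_lt_of_le h2 (le_of_eq h4))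
  · intro x y hxy
    simp only [Bool.or_eq_true, Bool.and_eq_true, Bool.not_eq_eq_eq_not, Bool.not_true,
      decide_eq_true_eq, decide_eq_false_iff_not, not_lt] at hxy
    rcases hxy with h1 | ⟨h1, h2⟩
    · exact Or.inl h1
    · rcases lt_or_eq_of_le h1 with h1' | h1'
      · exact Or.inl h1'
      · exact Or.inr ⟨h1', Or.inl h2⟩
  · intro x y hxy hq
    by_cases e1 : k1 x < k1 y
    · simp [e1] at hxy
    rcases lt_or_eq_of_le (not_lt.1 e1) with h | h
    · exact Or.inl h
    · by_cases e2 : k2 x < k2 y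
      · simp [e2, h] at hxy
      · rcases lt_or_eq_of_le (not_lt.1 e2) with h2 | h2
        · exact Or.inr ⟨h, Or.inl h2⟩
        · exact Or.inr ⟨h, Or.inr ⟨h2, hq⟩⟩

lemma pv_sorted_pairwise_stable {β κ : Type} [LinearOrder κ]
    (k : β → κ) (Q : β → β → Prop) (xs : List β) (hxs : xs.Pairwise Q) :
    (PySem.List.sorted xs k).Pairwise (fun a b => k a < k b ∨ (k a = k b ∧ Q a b)) := by
  rw [PySem.List.sorted_eq_foldl_insertBy]
  refine pv_isort_pairwise _ Q _ ?_ ?_ ?_ xs [] List.Pairwise.nil (by simp) hxs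
  · intro x y z hxy hyz
    rw [decide_eq_true_eq] at hxy
    rcases hyz with h | ⟨h, _⟩
    · exact Or.inl (lt_trans hxy h)
    · exact Or.inl (lt_of_lt_of_le hxy (le_of_eq h))
  · intro x y hxy
    rw [decide_eq_true_eq] at hxy
    exact Or.inl hxy
  · intro x y hxy hq
    rw [decide_eq_false_iff_not] at hxy
    rcases lt_or_eq_of_le (not_lt.1 hxy) with h | h
    · exact Or.inl h
    · exact Or.inr ⟨h, hq⟩

lemma pv_insertBy_map {β α : Type} (f : β → α) (before : α → α → Bool) (x : β) :
    ∀ (acc : List β),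
    (PySem.List.insertBy (fun a b => before (f a) (f b)) x acc).map f
      = PySem.List.insertBy before (f x) (acc.map f)
  | [] => rfl
  | y :: ys => by
    show (if before (f x) (f y) then x :: y :: ys else y :: PySem.List.insertBy _ x ys).map f
      = if before (f x) (f y) then f x :: f y :: ys.map f
        else f y :: PySem.List.insertBy before (f x) (ys.map f)
    by_cases h : before (f x) (f y) = true
    · simp [h]
    · rw [Bool.not_eq_true] at h
      simp only [h, Bool.false_eq_true, if_false, List.map_cons]
      rw [pv_insertBy_map f before x ys]

lemma pv_isort_map {β α : Type} (f : β → α) (before : α → α → Bool) :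
    ∀ (xs acc : List β),
    (xs.foldl (fun acc x => PySem.List.insertBy (fun a b => before (f a) (f b)) x acc) acc).map f
      = (xs.map f).foldl (fun acc x => PySem.List.insertBy before x acc) (acc.map f)
  | [], acc => rfl
  | x :: xs, acc => by
    simp only [List.map_cons, List.foldl_cons]
    rw [pv_isort_map f before xs _, pv_insertBy_map f before x acc]

lemma pv_sorted2_map {β α κ1 κ2 : Type} [LinearOrder κ1] [LinearOrder κ2]
    (f : β → α) (k1 : α → κ1) (k2 : α → κ2) (xs : List β) :
    (PySem.List.sorted2 xs (fun d => k1 (f d)) (fun d => k2 (f d))).map f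
      = PySem.List.sorted2 (xs.map f) k1 k2 := by
  show (xs.foldl (fun acc x => PySem.List.insertBy
      (fun a b => decide (k1 (f a) < k1 (f b)) || !decide (k1 (f b) < k1 (f a)) && decide (k2 (f a) < k2 (f b))) x acc) []).map f
    = (xs.map f).foldl (fun acc x => PySem.List.insertBy
      (fun a b => decide (k1 a < k1 b) || !decide (k1 b < k1 a) && decide (k2 a < k2 b)) x acc) []
  exact pv_isort_map f (fun a b => decide (k1 a < k1 b) || !decide (k1 b < k1 a) && decide (k2 a < k2 b)) xs []

lemma pv_flatMap_filter_perm {α β : Type} [BEq β] [LawfulBEq β] (g : α → β) :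
    ∀ (L : List β) (xs : List α), L.Nodup → (∀ x ∈ xs, g x ∈ L) →
    (L.flatMap (fun n => xs.filter (fun x => g x == n))).Perm xs
  | [], xs, _, hcov => by
    have : xs = [] := List.eq_nil_iff_forall_not_mem.2 (fun x hx => by simpa using hcov x hx)
    simp [this]
  | n :: L, xs, hnd, hcov => by
    rw [List.nodup_cons] at hnd
    obtain ⟨hn, hnd⟩ := hnd
    rw [List.flatMap_cons]
    have hmn : ∀ m ∈ L, m ≠ n := fun m hm e => hn (e ▸ hm)
    have hperm : (L.flatMap (fun m => xs.filter (fun x => g x == m))).Perm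
        (xs.filter (fun x => !(g x == n))) := by
      refine List.Perm.trans
        (List.Perm.flatMap (l₂ := L)
          (g := fun m => (xs.filter (fun x => !(g x == n))).filter (fun x => g x == m))
          (List.Perm.refl L) ?_)
        (pv_flatMap_filter_perm g L _ hnd ?_)
      · intro m hm
        refine List.Perm.of_eq ?_
        simp only [List.filter_filter]
        refine List.filter_congr ?_
        intro x _
        by_cases h : g x = m
        · simp [h, hmn m hm]
        · simp [h]
      · intro x hx
        rw [List.mem_filter] at hx
        rcases List.mem_cons.1 (hcov x hx.1) with h | h
        · exact absurd hx.2 (by simp [h])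
        · exact h
    exact List.Perm.trans (hperm.append_left _) (List.filter_append_perm _ xs)

lemma pv_pairwise_flatMap {β γ : Type} (L : List β) (F : β → List γ)
    (SK : β → β → Prop) (R : γ → γ → Prop)
    (hL : L.Pairwise SK) (hin : ∀ n ∈ L, (F n).Pairwise R)
    (hcross : ∀ a b, SK a b → ∀ x ∈ F a, ∀ y ∈ F b, R x y) :
    (L.flatMap F).Pairwise R := by
  induction L with
  | nil => exact List.Pairwise.nil
  | cons n L ih =>
    rw [List.pairwise_cons] at hL
    rw [List.flatMap_cons, List.pairwise_append]
    refine ⟨hin n List.mem_cons_self, ih hL.2 (fun m hm => hin m (List.mem_cons_of_mem _ hm)) , ?_⟩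
    intro x hx y hy
    rw [List.mem_flatMap] at hy
    obtain ⟨m, hm, hym⟩ := hy
    exact hcross n m (hL.1 m hm) x hx y hym

lemma pv_pairwise_idxOf {β : Type} [BEq β] [LawfulBEq β] (K : List β) (h : K.Nodup) :
    K.Pairwise (fun a b => List.idxOf a K < List.idxOf b K) := by
  rw [List.pairwise_iff_getElem]
  intro i j hi hj hij
  rw [h.idxOf_getElem i hi, h.idxOf_getElem j hj]
  exact hij

lemma pv_dedup_append_singleton {β : Type} [BEq β] [LawfulBEq β] (l : List β) (a : β) :
    PySem.List.dedup (l ++ [a]) = if a ∈ l then PySem.List.dedup l else PySem.List.dedup l ++ [a] := by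
  simp [pysem, PySem.Set.add, PySem.Set.contains]

-- ---------- A-side characterisations ----------

lemma pv_groupStep_eq :
    (fun (d : PySem.Dict String (List (List (String × String)))) promo =>
      let businessName := PySem.Str.strip (pvGet promo "business_name" "")
      let d := if d.contains businessName then d
               else d.insert businessName ([] : List (List (String × String)))
      d.insert businessName (d.getD businessName [] ++ [promo]))
    = fun d promo => d.modify (pvNm promo) [] (· ++ [promo]) := by
  funext d p
  show (let n := pvNm p
        let d' := if d.contains n then d else d.insert n []
        d'.insert n (d'.getD n [] ++ [p])) = _
  by_cases h : d.contains (pvNm p)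
  · simp only [h, if_true, PySem.Dict.modify]
  · rw [Bool.not_eq_true] at h
    simp only [h, Bool.false_eq_true, if_false, PySem.Dict.modify,
      PySem.Dict.getD_insert_self, PySem.Dict.insert_insert_self,
      PySem.Dict.getD_of_not_contains _ _ h, List.nil_append]

lemma pv_grouped_getD (promos : List (List (String × String))) (n : String) :
    (promos.foldl (fun d promo =>
      let businessName := PySem.Str.strip (pvGet promo "business_name" "")
      let d := if d.contains businessName then d
               else d.insert businessName ([] : List (List (String × String)))
      d.insert businessName (d.getD businessName [] ++ [promo])) PySem.Dict.empty).getD n []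
    = promos.filter (fun p => pvNm p == n) := by
  rw [pv_groupStep_eq]
  have : promos.foldl (fun d promo => d.modify (pvNm promo) [] (· ++ [promo])) PySem.Dict.empty
      = (promos.map (fun p => (pvNm p, p))).foldl (fun d q => d.modify q.1 [] (· ++ [q.2])) PySem.Dict.empty := by
    rw [List.foldl_map]
  rw [this, PySem.Dict.getD_foldl_modify_append]
  simp only [PySem.Dict.getD_empty, List.nil_append, List.filter_map, Function.comp_def, List.map_map]
  simp

lemma pv_grouped_keys (promos : List (List (String × String))) :
    (promos.foldl (fun d promo =>
      let businessName := PySem.Str.strip (pvGet promo "business_name" "")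
      let d := if d.contains businessName then d
               else d.insert businessName ([] : List (List (String × String)))
      d.insert businessName (d.getD businessName [] ++ [promo])) PySem.Dict.empty).keys
    = pvK promos := by
  rw [pv_groupStep_eq]
  have := PySem.Dict.keys_foldl_modify_key promos pvNm ([] : List (List (String × String)))
      (fun _ x v => v ++ [x]) PySem.Dict.empty
  simp only at this
  rw [this]
  simp only [pysem, pvK, PySem.Set.update]
  rw [PySem.Set.ofList]
  rfl

lemma pv_A_eq_flatMap (promos : List (List (String × String))) :
    group_and_sort_promos promos
      = (PySem.List.sorted (pvK promos) pvGetOrderA).flatMap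
          (fun n => PySem.List.sorted2 (promos.filter (fun p => pvNm p == n)) pvSvc pvOff) := by
  show ((PySem.List.sorted _ pvGetOrderA).foldl (fun acc businessName => acc ++ _) []) = _
  rw [pv_grouped_keys, PySem.List.foldl_append_eq_flatMap, List.nil_append]
  congr 1
  funext n
  rw [pv_grouped_getD]
  rfl

lemma pv_order_loop_eq (bl : String) : ∀ (l : List (Int × String)),
    pvOrderLoopA bl l
      = (match l.find? (fun p => PySem.Str.isIn (PySem.Str.lower p.2) bl || PySem.Str.isIn bl (PySem.Str.lower p.2)) with
         | some p => p.1
         | none => 999)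
  | [] => rfl
  | p :: l => by
    rcases p with ⟨idx, ob⟩
    simp only [pvOrderLoopA]
    rw [List.find?_cons]
    by_cases h : (PySem.Str.isIn (PySem.Str.lower ob) bl || PySem.Str.isIn bl (PySem.Str.lower ob)) = true
    · rw [h]
      simp
    · rw [Bool.not_eq_true] at h
      rw [h]
      simpa using pv_order_loop_eq bl l

lemma pv_order_eq : pvGetOrderA = pvGetOrderB := by
  funext s
  unfold pvGetOrderA pvGetOrderB
  exact pv_order_loop_eq (PySem.Str.lower s) (PySem.List.enumerate pvBusinessOrder 0)

-- ---------- B-side characterisations ----------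

lemma pv_fs_items (promos : List (List (String × String))) :
    (promos.foldl (fun d promo =>
        PySem.Dict.setdefault d (PySem.Str.strip (pvGet promo "business_name" "")) ((PySem.Dict.size d : Int)))
      PySem.Dict.empty).items
    = (pvK promos).zipIdx.map (fun q => (q.1, (q.2 : Int))) := by
  induction promos using List.reverseRecOn with
  | nil => rfl
  | append_singleton l p ih =>
    rw [List.foldl_append, List.foldl_cons, List.foldl_nil]
    have hK : pvK (l ++ [p]) = if pvNm p ∈ l.map pvNm then pvK l else pvK l ++ [pvNm p] := by
      rw [pvK, List.map_append, List.map_cons, List.map_nil, pv_dedup_append_singleton]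
      rfl
    have hkeys : (l.foldl (fun d promo =>
        PySem.Dict.setdefault d (PySem.Str.strip (pvGet promo "business_name" "")) ((PySem.Dict.size d : Int)))
        PySem.Dict.empty).keys = pvK l := by
      show ((l.foldl _ PySem.Dict.empty).items.map Prod.fst) = pvK l
      rw [ih, List.map_map]
      simp only [Function.comp_def]
      exact List.zipIdx_map_fst 0 _
    by_cases hm : pvNm p ∈ l.map pvNm
    · have hc : (l.foldl (fun d promo =>
          PySem.Dict.setdefault d (PySem.Str.strip (pvGet promo "business_name" "")) ((PySem.Dict.size d : Int)))
          PySem.Dict.empty).contains (pvNm p) = true := by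
        rw [PySem.Dict.contains_eq_decide_mem_keys, hkeys, decide_eq_true_eq, pvK,
          PySem.List.mem_dedup]
        exact hm
      rw [show PySem.Str.strip (pvGet p "business_name" "") = pvNm p from rfl,
        PySem.Dict.setdefault_of_contains _ _ hc, hK, if_pos hm]
      exact ih
    · have hc : (l.foldl (fun d promo =>
          PySem.Dict.setdefault d (PySem.Str.strip (pvGet promo "business_name" "")) ((PySem.Dict.size d : Int)))
          PySem.Dict.empty).contains (pvNm p) = false := by
        rw [PySem.Dict.contains_eq_decide_mem_keys, hkeys, decide_eq_false_iff_not, pvK,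
          PySem.List.mem_dedup]
        exact hm
      rw [show PySem.Str.strip (pvGet p "business_name" "") = pvNm p from rfl,
        PySem.Dict.setdefault_of_not_contains _ _ hc,
        PySem.Dict.items_insert_of_not_contains _ _ hc, ih, hK, if_neg hm]
      have hsize : (l.foldl (fun d promo =>
          PySem.Dict.setdefault d (PySem.Str.strip (pvGet promo "business_name" "")) ((PySem.Dict.size d : Int)))
          PySem.Dict.empty).size = (pvK l).length := by
        show ((l.foldl _ PySem.Dict.empty).items.length) = _
        rw [ih, List.length_map, List.length_zipIdx]
      rw [hsize, List.zipIdx_append, List.map_append]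
      simp

lemma pv_fs_getD (promos : List (List (String × String))) (n : String) (hn : n ∈ pvK promos) :
    (promos.foldl (fun d promo =>
        PySem.Dict.setdefault d (PySem.Str.strip (pvGet promo "business_name" "")) ((PySem.Dict.size d : Int)))
      PySem.Dict.empty).getD n 0
    = (List.idxOf n (pvK promos) : Int) := by
  have hit := pv_fs_items promos
  have hkeys : (promos.foldl (fun d promo =>
      PySem.Dict.setdefault d (PySem.Str.strip (pvGet promo "business_name" "")) ((PySem.Dict.size d : Int)))
      PySem.Dict.empty).keys = pvK promos := by
    show ((promos.foldl _ PySem.Dict.empty).items.map Prod.fst) = pvK promos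
    rw [hit, List.map_map]
    simp only [Function.comp_def]
    exact List.zipIdx_map_fst 0 _
  have hlt : List.idxOf n (pvK promos) < (pvK promos).length := List.idxOf_lt_length_of_mem hn
  refine PySem.Dict.getD_of_mem_items _ ?_ ?_ 0
  · rw [hit]
    refine List.mem_iff_getElem.2 ⟨List.idxOf n (pvK promos), ?_, ?_⟩
    · rw [List.length_map, List.length_zipIdx]
      exact hlt
    · rw [List.getElem_map, List.getElem_zipIdx]
      simp [List.getElem_idxOf]
  · rw [hkeys, pvK]
    exact PySem.List.nodup_dedup _

-- ---------- the main argument ----------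

lemma pv_R_asymm (promos : List (List (String × String))) (a b : Int × List (String × String))
    (h1 : pvR promos a b) (h2 : pvR promos b a) : False := by
  unfold pvR pvSin at h1 h2
  rcases h1 with h1 | ⟨e1, h1⟩
  · rcases h2 with h2 | ⟨e2, _⟩
    · exact lt_asymm h1 h2
    · exact absurd e2 (ne_of_gt h1)
  · rcases h2 with h2 | ⟨_, h2⟩
    · exact absurd e1 (ne_of_gt h2)
    · rcases h1 with h1 | ⟨f1, h1⟩
      · rcases h2 with h2 | ⟨f2, _⟩
        · exact lt_asymm h1 h2
        · exact absurd f2 (ne_of_gt h1)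
      · rcases h2 with h2 | ⟨_, h2⟩
        · exact absurd f1 (ne_of_gt h2)
        · rcases h1 with h1 | ⟨g1, h1⟩
          · rcases h2 with h2 | ⟨g2, _⟩
            · exact lt_asymm h1 h2
            · exact absurd g2 (ne_of_gt h1)
          · rcases h2 with h2 | ⟨_, h2⟩
            · exact absurd g1 (ne_of_gt h2)
            · rcases h1 with h1 | ⟨e4, h1⟩
              · rcases h2 with h2 | ⟨k2, _⟩
                · exact lt_asymm h1 h2
                · exact absurd k2 (ne_of_gt h1)
              · rcases h2 with h2 | ⟨_, h2⟩
                · exact absurd e4 (ne_of_gt h2)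
                · exact lt_asymm h1 h2

set_option maxHeartbeats 1000000 in
theorem pv_main (promos : List (List (String × String))) :
    group_and_sort_promos promos = group_and_sort_promos_alt promos := by
  classical
  have hsnd : (PySem.List.enumerate promos 0).map Prod.snd = promos :=
    PySem.List.map_snd_enumerate promos 0
  have hKnodup : (pvK promos).Nodup := PySem.List.nodup_dedup _
  have hcov : ∀ d ∈ PySem.List.enumerate promos 0, pvNm d.2 ∈ pvK promos := by
    intro d hd
    rw [pvK, PySem.List.mem_dedup]
    exact List.mem_map_of_mem (hsnd ▸ List.mem_map_of_mem hd)
  -- ---- A as (map Prod.snd) of a decorated flatMap ----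
  have hAfilter : ∀ n : String, promos.filter (fun p => pvNm p == n)
      = ((PySem.List.enumerate promos 0).filter (fun d => pvNm d.2 == n)).map Prod.snd := by
    intro n
    conv_lhs => rw [← hsnd]
    rw [List.filter_map]
    rfl
  have hA : group_and_sort_promos promos
      = ((PySem.List.sorted (pvK promos) pvGetOrderB).flatMap
          (fun n => PySem.List.sorted2
              ((PySem.List.enumerate promos 0).filter (fun d => pvNm d.2 == n))
              (fun d => pvSvc d.2) (fun d => pvOff d.2))).map Prod.snd := by
    rw [pv_A_eq_flatMap, pv_order_eq, List.map_flatMap]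
    congr 1
    funext n
    rw [hAfilter n, ← pv_sorted2_map Prod.snd pvSvc pvOff]
  -- ---- B as (map Prod.snd) of two decorated sorts ----
  have hB : (PySem.List.sorted2
           (PySem.List.sorted2 (PySem.List.enumerate promos 0)
             (fun d => pvSvc d.2) (fun d => pvOff d.2))
           (fun d => pvGetOrderB (pvNm d.2))
           (fun d => (promos.foldl (fun d promo =>
               PySem.Dict.setdefault d (PySem.Str.strip (pvGet promo "business_name" ""))
                 ((PySem.Dict.size d : Int))) PySem.Dict.empty).getD (pvNm d.2) 0)).map Prod.snd
      = group_and_sort_promos_alt promos := by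
    rw [pv_sorted2_map Prod.snd (fun p => pvGetOrderB (pvNm p))
        (fun p => (promos.foldl (fun d promo =>
            PySem.Dict.setdefault d (PySem.Str.strip (pvGet promo "business_name" ""))
              ((PySem.Dict.size d : Int))) PySem.Dict.empty).getD (pvNm p) 0),
      pv_sorted2_map Prod.snd pvSvc pvOff, hsnd]
    rfl
  -- ---- pairwise facts ----
  have hdxsPW : (PySem.List.enumerate promos 0).Pairwise (fun d e => d.1 < e.1) :=
    PySem.List.pairwise_lt_enumerate promos 0
  have hsortedK := pv_sorted_pairwise_stable pvGetOrderB
      (fun a b => List.idxOf a (pvK promos) < List.idxOf b (pvK promos))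
      (pvK promos) (pv_pairwise_idxOf (pvK promos) hKnodup)
  have hblockSin : ∀ n : String, (PySem.List.sorted2
      ((PySem.List.enumerate promos 0).filter (fun d => pvNm d.2 == n))
      (fun d => pvSvc d.2) (fun d => pvOff d.2)).Pairwise pvSin := by
    intro n
    have hf := hdxsPW.sublist (List.filter_sublist (p := fun d : Int × List (String × String) => pvNm d.2 == n))
    have := pv_sorted2_pairwise_stable
      (fun d : Int × List (String × String) => pvSvc d.2)
      (fun d : Int × List (String × String) => pvOff d.2)
      (fun d e => d.1 < e.1)
      ((PySem.List.enumerate promos 0).filter (fun d => pvNm d.2 == n)) hf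
    exact this.imp (fun h => h)
  have hmemblock : ∀ (n : String) d, d ∈ PySem.List.sorted2
      ((PySem.List.enumerate promos 0).filter (fun x => pvNm x.2 == n))
      (fun d => pvSvc d.2) (fun d => pvOff d.2) → pvNm d.2 = n := by
    intro n d hd
    have := (PySem.List.sorted2_perm _ _ _ _).mem_iff.1 hd
    rw [List.mem_filter] at this
    exact eq_of_beq this.2
  have hApw : ((PySem.List.sorted (pvK promos) pvGetOrderB).flatMap
      (fun n => PySem.List.sorted2
          ((PySem.List.enumerate promos 0).filter (fun d => pvNm d.2 == n))
          (fun d => pvSvc d.2) (fun d => pvOff d.2))).Pairwise (pvR promos) := by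
    refine pv_pairwise_flatMap _ _
      (fun a b => pvGetOrderB a < pvGetOrderB b ∨
        (pvGetOrderB a = pvGetOrderB b ∧ List.idxOf a (pvK promos) < List.idxOf b (pvK promos)))
      (pvR promos) hsortedK ?_ ?_
    · intro n hn
      refine (hblockSin n).imp_of_mem ?_
      intro a b ha hb hS
      have hna := hmemblock n a ha
      have hnb := hmemblock n b hb
      exact Or.inr ⟨by rw [hna, hnb], Or.inr ⟨by rw [hna, hnb], hS⟩⟩
    · intro a b hSK x hx y hy
      have hna := hmemblock a x hx
      have hnb := hmemblock b y hy
      rcases hSK with h | ⟨h, h'⟩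
      · exact Or.inl (by rw [hna, hnb]; exact h)
      · refine Or.inr ⟨by rw [hna, hnb]; exact h, Or.inl ?_⟩
        rw [hna, hnb]
        exact_mod_cast h'
  have hApm : ((PySem.List.sorted (pvK promos) pvGetOrderB).flatMap
      (fun n => PySem.List.sorted2
          ((PySem.List.enumerate promos 0).filter (fun d => pvNm d.2 == n))
          (fun d => pvSvc d.2) (fun d => pvOff d.2))).Perm (PySem.List.enumerate promos 0) := by
    have step1 : ((PySem.List.sorted (pvK promos) pvGetOrderB).flatMap
        (fun n => PySem.List.sorted2
            ((PySem.List.enumerate promos 0).filter (fun d => pvNm d.2 == n))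
            (fun d => pvSvc d.2) (fun d => pvOff d.2))).Perm
        ((PySem.List.sorted (pvK promos) pvGetOrderB).flatMap
          (fun n => (PySem.List.enumerate promos 0).filter (fun d => pvNm d.2 == n))) :=
      List.Perm.flatMap (List.Perm.refl _) (fun n _ => PySem.List.sorted2_perm _ _ _ _)
    have step2 : ((PySem.List.sorted (pvK promos) pvGetOrderB).flatMap
        (fun n => (PySem.List.enumerate promos 0).filter (fun d => pvNm d.2 == n))).Perm
        ((pvK promos).flatMap
          (fun n => (PySem.List.enumerate promos 0).filter (fun d => pvNm d.2 == n))) :=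
      List.Perm.flatMap (PySem.List.sorted_perm _ _ _) (fun n _ => List.Perm.refl _)
    exact (step1.trans step2).trans
      (pv_flatMap_filter_perm (fun d : Int × List (String × String) => pvNm d.2) (pvK promos)
        (PySem.List.enumerate promos 0) hKnodup hcov)
  -- B side
  have hinnerSin : (PySem.List.sorted2 (PySem.List.enumerate promos 0)
      (fun d => pvSvc d.2) (fun d => pvOff d.2)).Pairwise pvSin := by
    have := pv_sorted2_pairwise_stable
      (fun d : Int × List (String × String) => pvSvc d.2)
      (fun d : Int × List (String × String) => pvOff d.2)
      (fun d e => d.1 < e.1) (PySem.List.enumerate promos 0) hdxsPW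
    exact this.imp (fun h => h)
  have hmemB : ∀ d, d ∈ PySem.List.sorted2
      (PySem.List.sorted2 (PySem.List.enumerate promos 0)
        (fun d => pvSvc d.2) (fun d => pvOff d.2))
      (fun d => pvGetOrderB (pvNm d.2))
      (fun d => (promos.foldl (fun d promo =>
          PySem.Dict.setdefault d (PySem.Str.strip (pvGet promo "business_name" ""))
            ((PySem.Dict.size d : Int))) PySem.Dict.empty).getD (pvNm d.2) 0)
      → d ∈ PySem.List.enumerate promos 0 := by
    intro d hd
    exact ((PySem.List.sorted2_perm _ _ _ _).mem_iff.1
      ((PySem.List.sorted2_perm _ _ _ _).mem_iff.1 hd))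
  have hBpw : (PySem.List.sorted2
      (PySem.List.sorted2 (PySem.List.enumerate promos 0)
        (fun d => pvSvc d.2) (fun d => pvOff d.2))
      (fun d => pvGetOrderB (pvNm d.2))
      (fun d => (promos.foldl (fun d promo =>
          PySem.Dict.setdefault d (PySem.Str.strip (pvGet promo "business_name" ""))
            ((PySem.Dict.size d : Int))) PySem.Dict.empty).getD (pvNm d.2) 0)).Pairwise (pvR promos) := by
    have h0 := pv_sorted2_pairwise_stable
      (fun d : Int × List (String × String) => pvGetOrderB (pvNm d.2))
      (fun d => (promos.foldl (fun d promo =>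
          PySem.Dict.setdefault d (PySem.Str.strip (pvGet promo "business_name" ""))
            ((PySem.Dict.size d : Int))) PySem.Dict.empty).getD (pvNm d.2) 0)
      pvSin _ hinnerSin
    refine h0.imp_of_mem ?_
    intro a b ha hb hS
    have hfa := pv_fs_getD promos (pvNm a.2) (hcov a (hmemB a ha))
    have hfb := pv_fs_getD promos (pvNm b.2) (hcov b (hmemB b hb))
    beta_reduce at hS
    rw [hfa, hfb] at hS
    exact hS
  have hBpm : (PySem.List.sorted2
      (PySem.List.sorted2 (PySem.List.enumerate promos 0)
        (fun d => pvSvc d.2) (fun d => pvOff d.2))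
      (fun d => pvGetOrderB (pvNm d.2))
      (fun d => (promos.foldl (fun d promo =>
          PySem.Dict.setdefault d (PySem.Str.strip (pvGet promo "business_name" ""))
            ((PySem.Dict.size d : Int))) PySem.Dict.empty).getD (pvNm d.2) 0)).Perm
      (PySem.List.enumerate promos 0) :=
    List.Perm.trans (PySem.List.sorted2_perm _ _ _ _) (PySem.List.sorted2_perm _ _ _ _)
  have hAB := List.Perm.eq_of_pairwise (le := pvR promos)
    (fun a b _ _ h1 h2 => (pv_R_asymm promos a b h1 h2).elim)
    hApw hBpw (hApm.trans hBpm.symm)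
  rw [hA, ← hB, hAB]


-- ===== VERDICT (by name: the statement is the Claim_ definition above) =====
theorem group_and_sort_promos_spec : Claim_equal_group_and_sort_promos := by
  intro promos _
  unfold Spec_group_and_sort_promos
  exact pv_main promos
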